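-- pv_equiv track=rewrite | github.com/kryptobaseddev/openclawdocs | src/openclaw_docs/display.py | fmt_categories
-- ===== SOURCE A (Python) =====
-- def fmt_categories(categories: list[tuple[str, int]]) -> str:
--     """Format category listing."""
--     if not categories:
--         return "No topics synced. Run `openclaw-docs sync` first."
--
--     lines = []
--     total_topics = 0
--     # Display in columns of 3
--     row: list[str] = []
--     for cat, count in categories:
--         total_topics += count
--         entry = f"{cat:<15} {count:>3}"
--         row.append(entry)
--         if len(row) == 3:
--             lines.append("    ".join(row))
--             row = []
--     if row:
--         lines.append("    ".join(row))
--
--     lines.append("")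
--     lines.append(f"Total: {total_topics} topics across {len(categories)} categories")
--     return "\n".join(lines)
-- ===== SOURCE B (Python) =====
-- def fmt_categories(categories: list[tuple[str, int]]) -> str:
--     """Format category listing (slice-chunked re-implementation)."""
--     if not categories:
--         return "No topics synced. Run `openclaw-docs sync` first."
--
--     entries = [f"{cat:<15} {count:>3}" for cat, count in categories]
--     total_topics = sum(count for _, count in categories)
--     rows = ["    ".join(entries[i:i + 3]) for i in range(0, len(entries), 3)]
--     return "\n".join(
--         rows + ["", f"Total: {total_topics} topics across {len(categories)} categories"]
--     )
-- ===== Notes on version B (the rewrite author's own statement) =====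
-- stated objective: alternative
-- what changed: Replaces A's single interleaved pass (running total plus an append-and-flush-at-3 row state machine) with separate passes: a comprehension formatting all entries, a sum() for the total, and index-based slice chunking entries[i:i+3] over range(0, len, 3) to form the rows.
import Mathlib
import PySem

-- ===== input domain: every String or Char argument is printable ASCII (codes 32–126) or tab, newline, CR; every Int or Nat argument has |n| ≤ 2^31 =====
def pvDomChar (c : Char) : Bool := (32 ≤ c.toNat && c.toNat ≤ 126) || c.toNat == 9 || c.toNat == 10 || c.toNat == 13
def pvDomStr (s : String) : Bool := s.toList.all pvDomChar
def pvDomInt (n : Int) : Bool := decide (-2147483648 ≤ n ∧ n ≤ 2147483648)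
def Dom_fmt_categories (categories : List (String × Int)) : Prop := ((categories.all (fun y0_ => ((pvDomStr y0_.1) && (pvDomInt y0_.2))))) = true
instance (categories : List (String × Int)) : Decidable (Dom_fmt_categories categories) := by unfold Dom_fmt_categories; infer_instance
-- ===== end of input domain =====

-- B replaces A's interleaved running-total + flush-at-3 row state machine by separate passes
-- (map entries, sum totals, slice-based chunking into rows of 3); same cost, different decomposition.


-- ===== PORT A =====
-- f"{cat:<15} {count:>3}": Python format padding ported by hand (pad right/left with spaces
-- to the minimum width; exact for every string and int, since str(count) is PySem.Int.toChars).
def pvEntry (cat : String) (count : Int) : List Char :=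
  let c := cat.toList
  let n := PySem.Int.toChars count
  (c ++ List.replicate (15 - c.length) ' ') ++ [' '] ++ (List.replicate (3 - n.length) ' ' ++ n)

-- f"Total: {total} topics across {ncat} categories"
def pvTotalLine (total : Int) (ncat : Int) : List Char :=
  "Total: ".toList ++ PySem.Int.toChars total ++ " topics across ".toList
    ++ PySem.Int.toChars ncat ++ " categories".toList

-- the body of A's for-loop: state = (lines, total, row)
def pvStepA (s : List (List Char) × Int × List (List Char)) (p : String × Int) :
    List (List Char) × Int × List (List Char) :=
  let total := s.2.1 + p.2
  let row := s.2.2 ++ [pvEntry p.1 p.2]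
  if row.length = 3 then (s.1 ++ [PySem.Chars.join "    ".toList row], total, [])
  else (s.1, total, row)

def fmt_categories (categories : List (String × Int)) : String :=
  if categories = [] then "No topics synced. Run `openclaw-docs sync` first."
  else
    let st := categories.foldl pvStepA ([], 0, [])
    let lines := if st.2.2 ≠ [] then st.1 ++ [PySem.Chars.join "    ".toList st.2.2] else st.1
    let lines := lines ++ [[], pvTotalLine st.2.1 (categories.length : Int)]
    String.ofList (PySem.Chars.join "\n".toList lines)

-- ===== PORT B =====
def fmt_categories_alt (categories : List (String × Int)) : String :=
  if categories = [] then "No topics synced. Run `openclaw-docs sync` first."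
  else
    let entries := categories.map (fun p => pvEntry p.1 p.2)
    let total := (categories.map (fun p => p.2)).sum
    let rows := (PySem.List.pyRange 0 (entries.length : Int) 3).map
      (fun i => PySem.Chars.join "    ".toList (PySem.List.slice entries (some i) (some (i + 3))))
    String.ofList (PySem.Chars.join "\n".toList
      (rows ++ [[], pvTotalLine total (categories.length : Int)]))

-- ===== PRECONDITION & SPEC =====
def Spec_fmt_categories (categories : List (String × Int)) (out : String) : Prop := out = fmt_categories_alt categories
instance (categories : List (String × Int)) (out : String) : Decidable (Spec_fmt_categories categories out) := by unfold Spec_fmt_categories; infer_instance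

-- ===== CLAIM (what is proved, stated in full; the proofs are below) =====
def Claim_equal_fmt_categories : Prop := ∀ (categories : List (String × Int)), Dom_fmt_categories categories → Spec_fmt_categories categories (fmt_categories categories)

-- ===== LEMMAS AND PROOFS =====

-- reference chunking: A's flush-at-3 loop, written as a recursion on the entry list
def pvChunk (row : List (List Char)) : List (List Char) → List (List Char)
  | [] => if row = [] then [] else [PySem.Chars.join "    ".toList row]
  | e :: es =>
    if (row ++ [e]).length = 3 then
      PySem.Chars.join "    ".toList (row ++ [e]) :: pvChunk [] es
    else pvChunk (row ++ [e]) es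

-- A's loop: the flushed lines are pvChunk and the total is the sum
theorem pvLoopA_eq : ∀ (cats : List (String × Int)) (lines : List (List Char)) (total : Int)
    (row : List (List Char)),
    (let st := cats.foldl pvStepA (lines, total, row)
     ((if st.2.2 ≠ [] then st.1 ++ [PySem.Chars.join "    ".toList st.2.2] else st.1), st.2.1))
    = (lines ++ pvChunk row (cats.map (fun p => pvEntry p.1 p.2)),
       total + (cats.map (fun p => p.2)).sum) := by
  intro cats
  induction cats with
  | nil =>
    intro lines total row
    simp only [List.foldl_nil, List.map_nil, List.sum_nil, add_zero, pvChunk]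
    by_cases hr : row = [] <;> simp [hr]
  | cons p rest ih =>
    intro lines total row
    simp only [List.foldl_cons, List.map_cons, List.sum_cons]
    by_cases h3 : (row ++ [pvEntry p.1 p.2]).length = 3
    · have hs : pvStepA (lines, total, row) p
          = (lines ++ [PySem.Chars.join "    ".toList (row ++ [pvEntry p.1 p.2])],
             total + p.2, []) := by
        simp only [pvStepA, if_pos h3]
      rw [hs, ih, pvChunk, if_pos h3]
      simp [List.append_assoc, add_assoc]
    · have hs : pvStepA (lines, total, row) p
          = (lines, total + p.2, row ++ [pvEntry p.1 p.2]) := by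
        simp only [pvStepA, if_neg h3]
      rw [hs, ih, pvChunk, if_neg h3]
      simp [add_assoc]

theorem pvRange3_cons (n : Int) (h : 0 < n) :
    PySem.List.pyRange 0 n 3 = 0 :: (PySem.List.pyRange 0 (n - 3) 3).map (· + 3) := by
  rw [PySem.List.pyRange_of_pos 0 n (by norm_num),
      PySem.List.pyRange_of_pos 0 (n - 3) (by norm_num)]
  have hc : (if (0:Int) < n then ((n - 0 + 3 - 1) / 3).toNat else 0)
      = (if (0:Int) < n - 3 then ((n - 3 - 0 + 3 - 1) / 3).toNat else 0) + 1 := by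
    split_ifs <;> omega
  rw [hc, List.range_succ_eq_map]
  simp only [List.map_cons, List.map_map]
  congr 1

-- B's slice chunking equals the reference chunking
theorem pvRows_eq : ∀ (es : List (List Char)),
    (PySem.List.pyRange 0 (es.length : Int) 3).map
      (fun i => PySem.Chars.join "    ".toList (PySem.List.slice es (some i) (some (i + 3))))
    = pvChunk [] es
  | [] => by
    simp [pvChunk, PySem.List.pyRange]
  | [a] => by
    have h1 : ((([a] : List (List Char)).length : Int)) = 1 := by simp
    have hr : PySem.List.pyRange 0 (1 : Int) 3 = [0] := by decide
    rw [h1, hr]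
    simp only [List.map_cons, List.map_nil]
    rw [PySem.List.slice_toNat _ (by norm_num) (by norm_num)]
    simp [pvChunk]
  | [a, b] => by
    have h1 : ((([a, b] : List (List Char)).length : Int)) = 2 := by simp
    have hr : PySem.List.pyRange 0 (2 : Int) 3 = [0] := by decide
    rw [h1, hr]
    simp only [List.map_cons, List.map_nil]
    rw [PySem.List.slice_toNat _ (by norm_num) (by norm_num)]
    simp [pvChunk]
  | a :: b :: c :: rest => by
    have hlen : (((a :: b :: c :: rest : List (List Char)).length : Int)) = (rest.length : Int) + 3 := by
      simp; omega
    rw [hlen, pvRange3_cons _ (by positivity), List.map_cons, List.map_map]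
    have hn : (rest.length : Int) + 3 - 3 = (rest.length : Int) := by ring
    rw [hn]
    have hchunk : pvChunk [] (a :: b :: c :: rest)
        = PySem.Chars.join "    ".toList [a, b, c] :: pvChunk [] rest := by
      simp [pvChunk]
    rw [hchunk, ← pvRows_eq rest]
    congr 1
    refine List.map_congr_left ?_
    intro i hi
    have hi0 : 0 ≤ i := ((PySem.List.mem_pyRange_iff_of_pos (by norm_num) i).mp hi).1
    simp only [Function.comp_apply]
    have hsl : PySem.List.slice (a :: b :: c :: rest) (some (i + 3)) (some (i + 3 + 3))
        = PySem.List.slice rest (some i) (some (i + 3)) := by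
      rw [PySem.List.slice_toNat _ (by omega) (by omega),
          PySem.List.slice_toNat _ hi0 (by omega)]
      have h1 : (i + 3).toNat = i.toNat + 3 := by omega
      have h2 : (i + 3 + 3).toNat = i.toNat + 3 + 3 := by omega
      rw [h1, h2]
      simp [List.drop_succ_cons]
    rw [hsl]

-- ===== VERDICT (by name: the statement is the Claim_ definition above) =====
theorem fmt_categories_spec : Claim_equal_fmt_categories := by
  intro cats _
  unfold Spec_fmt_categories fmt_categories fmt_categories_alt
  by_cases h : cats = []
  · simp [h]
  · simp only [if_neg h]
    have hA := pvLoopA_eq cats [] 0 []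
    simp only [List.nil_append, zero_add] at hA
    have h1 := congrArg Prod.fst hA
    have h2 := congrArg Prod.snd hA
    simp only at h1 h2
    rw [h1, h2, ← pvRows_eq (cats.map (fun p => pvEntry p.1 p.2))]
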